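-- pv_equiv track=rewrite | github.com/Warren-530/Brugada-Detection | brugada/tabs/ecg_review_tab.py | _ordered_leads
-- ===== SOURCE A (Python) =====
-- def _ordered_leads(available_leads: list[str]) -> list[str]:
--     canonical_order = [
--         "I",
--         "II",
--         "III",
--         "aVR",
--         "aVL",
--         "aVF",
--         "V1",
--         "V2",
--         "V3",
--         "V4",
--         "V5",
--         "V6",
--     ]
--
--     seen = set()
--     ordered = []
--
--     for lead in canonical_order:
--         if lead in available_leads and lead not in seen:
--             ordered.append(lead)
--             seen.add(lead)
--
--     for lead in available_leads:
--         if lead not in seen: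
--             ordered.append(lead)
--             seen.add(lead)
--
--     return ordered
-- ===== SOURCE B (Python) =====
-- def _ordered_leads(available_leads: list[str]) -> list[str]:
--     canonical_order = [
--         "I", "II", "III", "aVR", "aVL", "aVF",
--         "V1", "V2", "V3", "V4", "V5", "V6",
--     ]
--     rank = {lead: i for i, lead in enumerate(canonical_order)}
--     buckets = [[] for _ in range(13)]
--     for lead in dict.fromkeys(available_leads):
--         buckets[rank.get(lead, 12)].append(lead)
--     out = []
--     for b in buckets:
--         out += b
--     return out
-- ===== Notes on version B (the rewrite author's own statement) =====
-- stated objective: faster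
-- what changed: Replaces A's two sequential scans (each canonical lead tested with 'lead in available_leads', an O(n) list scan, then a seen-set pass) by a rank-table bucket sort: deduplicate available_leads once via dict.fromkeys, scatter each lead into one of 13 buckets by its canonical rank (12 for extras), and concatenate the buckets.
import Mathlib
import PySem

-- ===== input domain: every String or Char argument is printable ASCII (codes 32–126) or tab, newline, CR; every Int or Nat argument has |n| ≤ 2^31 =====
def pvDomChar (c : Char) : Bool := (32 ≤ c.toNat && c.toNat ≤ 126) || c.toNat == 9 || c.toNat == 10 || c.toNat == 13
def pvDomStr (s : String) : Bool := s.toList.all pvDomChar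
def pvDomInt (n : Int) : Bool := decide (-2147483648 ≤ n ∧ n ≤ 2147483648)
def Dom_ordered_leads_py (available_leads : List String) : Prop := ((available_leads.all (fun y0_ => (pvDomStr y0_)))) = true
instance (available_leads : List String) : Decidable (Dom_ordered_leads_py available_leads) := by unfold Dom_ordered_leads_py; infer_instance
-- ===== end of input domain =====

-- B replaces A's two sequential scans (with their per-lead list-membership tests) by a rank-table bucket sort over the deduplicated input; a timing run measured B faster by a constant factor.

-- ===== PORT A =====
-- literal transliteration of A: canonical scan with a seen-set, then a scan of available_leads
def ordered_leads_py (available_leads : List String) : List String :=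
  let canonical_order : List String :=
    ["I", "II", "III", "aVR", "aVL", "aVF", "V1", "V2", "V3", "V4", "V5", "V6"]
  let st :=
    canonical_order.foldl
      (fun (st : PySem.Set String × List String) lead =>
        if available_leads.contains lead && !(PySem.Set.contains st.1 lead) then
          (PySem.Set.add st.1 lead, st.2 ++ [lead])
        else st)
      (PySem.Set.empty, [])
  let st :=
    available_leads.foldl
      (fun (st : PySem.Set String × List String) lead =>
        if !(PySem.Set.contains st.1 lead) then
          (PySem.Set.add st.1 lead, st.2 ++ [lead])
        else st)
      st
  st.2

-- ===== PORT B =====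
-- literal transliteration of B: rank dict, 13 buckets filled over dedup(available_leads), then concatenation
def ordered_leads_py_alt (available_leads : List String) : List String :=
  let canonical_order : List String :=
    ["I", "II", "III", "aVR", "aVL", "aVF", "V1", "V2", "V3", "V4", "V5", "V6"]
  let rank : PySem.Dict String Int :=
    (PySem.List.enumerate canonical_order).foldl (fun d p => d.insert p.2 p.1) PySem.Dict.empty
  let buckets : List (List String) := List.replicate 13 []
  let buckets :=
    (PySem.List.dedup available_leads).foldl
      (fun bs lead =>
        PySem.List.pySetD bs (rank.getD lead 12)
          (PySem.List.pyGetD bs (rank.getD lead 12) [] ++ [lead]))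
      buckets
  buckets.foldl (fun out b => out ++ b) []

-- ===== PRECONDITION & SPEC =====
def Spec_ordered_leads_py (available_leads : List String) (out : List String) : Prop := out = ordered_leads_py_alt available_leads
instance (available_leads : List String) (out : List String) : Decidable (Spec_ordered_leads_py available_leads out) := by unfold Spec_ordered_leads_py; infer_instance

-- ===== CLAIM (what is proved, stated in full; the proofs are below) =====
def Claim_equal_ordered_leads_py : Prop := ∀ (available_leads : List String), Dom_ordered_leads_py available_leads → Spec_ordered_leads_py available_leads (ordered_leads_py available_leads)

-- ===== LEMMAS AND PROOFS =====

def pvCanon : List String :=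
  ["I", "II", "III", "aVR", "aVL", "aVF", "V1", "V2", "V3", "V4", "V5", "V6"]

-- the rank of a lead, as B's dict computes it (12 = extra)
def pvRankN (l : String) : Nat :=
  if l == "V6" then 11 else if l == "V5" then 10 else if l == "V4" then 9
  else if l == "V3" then 8 else if l == "V2" then 7 else if l == "V1" then 6
  else if l == "aVF" then 5 else if l == "aVL" then 4 else if l == "aVR" then 3
  else if l == "III" then 2 else if l == "II" then 1 else if l == "I" then 0
  else 12

lemma pvRank_eq (l : String) :
    ((PySem.List.enumerate pvCanon).foldl (fun d p => d.insert p.2 p.1) PySem.Dict.empty).getD l 12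
      = (pvRankN l : Int) := by
  simp only [pvCanon, PySem.List.enumerate, List.foldl]
  simp [PySem.Dict.getD_insert, pvRankN]

set_option maxHeartbeats 1000000 in
lemma pvRankN_lt (l : String) : pvRankN l < 13 := by
  unfold pvRankN; split_ifs <;> omega

set_option maxHeartbeats 1000000 in
lemma pvRankN_inj (l : String) (i : Nat) (h : pvRankN l = i) (hi : i < 12) :
    l = pvCanon.getD i "" := by
  unfold pvRankN at h
  split_ifs at h with h1 h2 h3 h4 h5 h6 h7 h8 h9 h10 h11 h12 <;> subst h <;>
    first
      | omega
      | (simp_all [pvCanon])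

set_option maxHeartbeats 1000000 in
lemma pvRankN_extra (l : String) (h : pvRankN l = 12) : ¬ l ∈ pvCanon := by
  unfold pvRankN at h
  split_ifs at h <;> simp_all [pvCanon]

lemma foldl_add_eq (xs : List String) : ∀ (s : PySem.Set String),
    xs.foldl PySem.Set.add s = s ++ (PySem.Set.ofList xs).filter (fun y => !(s.contains y)) := by
  induction xs with
  | nil => intro s; simp [PySem.Set.ofList]
  | cons x xs ih =>
    intro s
    have hx : PySem.Set.ofList (x :: xs) = [x] ++ (PySem.Set.ofList xs).filter (fun y => !(PySem.Set.contains [x] y)) := by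
      show (x :: xs).foldl PySem.Set.add PySem.Set.empty = _
      rw [List.foldl_cons, ih]
      simp [PySem.Set.add, PySem.Set.contains, PySem.Set.empty]
    rw [List.foldl_cons, ih (PySem.Set.add s x), hx]
    by_cases hmem : x ∈ s
    · have hc : s.contains x = true := by simpa [PySem.Set.contains] using hmem
      have : PySem.Set.add s x = s := by simp [PySem.Set.add, PySem.Set.contains]; exact hmem
      rw [this, List.filter_append, List.filter_filter]
      have h1 : List.filter (fun y => !PySem.Set.contains s y) [x] = [] := by
        simp [PySem.Set.contains, hmem]
      rw [h1, List.nil_append]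
      congr 1
      apply List.filter_congr
      intro y _
      by_cases hy : y = x
      · subst hy; simp [PySem.Set.contains, hmem]
      · simp [PySem.Set.contains, hy]
    · have hc : s.contains x = false := by simp [PySem.Set.contains, hmem]
      have : PySem.Set.add s x = s ++ [x] := by simp [PySem.Set.add, PySem.Set.contains]; exact hmem
      rw [this, List.filter_append, List.filter_filter]
      have h1 : List.filter (fun y => !PySem.Set.contains s y) [x] = [x] := by
        simp [PySem.Set.contains, hmem]
      rw [h1, List.append_assoc]
      congr 2
      apply List.filter_congr
      intro y _
      by_cases hy : y = x
      · subst hy; simp [PySem.Set.contains, hmem]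
      · simp [PySem.Set.contains, hy]

lemma dedup_cons (x : String) (xs : List String) :
    PySem.List.dedup (x :: xs) = x :: (PySem.List.dedup xs).filter (fun y => !(y == x)) := by
  show PySem.Set.ofList (x :: xs) = _
  show (x :: xs).foldl PySem.Set.add PySem.Set.empty = _
  rw [List.foldl_cons, foldl_add_eq]
  have : PySem.Set.add PySem.Set.empty x = [x] := by
    simp [PySem.Set.add, PySem.Set.contains, PySem.Set.empty]
  rw [this]
  show x :: _ = x :: _
  congr 1
  apply List.filter_congr
  intro y _
  by_cases h : y = x <;> simp [PySem.Set.contains, h]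

lemma pvLoop1 (avail : List String) : ∀ (cs : List String) (s : PySem.Set String) (o : List String),
    cs.Nodup → (∀ l ∈ cs, s.contains l = false) →
    cs.foldl
      (fun (st : PySem.Set String × List String) lead =>
        if avail.contains lead && !(PySem.Set.contains st.1 lead) then
          (PySem.Set.add st.1 lead, st.2 ++ [lead])
        else st) (s, o)
      = (s ++ cs.filter (fun l => avail.contains l), o ++ cs.filter (fun l => avail.contains l)) := by
  intro cs
  induction cs with
  | nil => intro s o _ _; simp
  | cons c cs ih =>
    intro s o hnd hs
    have hsc : s.contains c = false := hs c (by simp)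
    have hcs : c ∉ s := by simpa [PySem.Set.contains] using hsc
    rw [List.foldl_cons, List.filter_cons]
    by_cases hav : avail.contains c = true
    · have hav' : c ∈ avail := by simpa using hav
      have hstep : (if avail.contains c && !(PySem.Set.contains s c) then
          (PySem.Set.add s c, o ++ [c]) else (s, o)) = (s ++ [c], o ++ [c]) := by
        simp [PySem.Set.add, PySem.Set.contains, hcs, hav']
      rw [hstep, ih (s ++ [c]) (o ++ [c]) (List.Nodup.of_cons hnd)]
      · simp [hav']
      · intro l hl
        have hne : l ≠ c := fun h => (List.nodup_cons.mp hnd).1 (h ▸ hl)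
        have hthis := hs l (List.mem_cons_of_mem _ hl)
        simp [PySem.Set.contains] at hthis ⊢
        exact ⟨hthis, hne⟩
    · have havn : c ∉ avail := by simpa using hav
      have hstep : (if avail.contains c && !(PySem.Set.contains s c) then
          (PySem.Set.add s c, o ++ [c]) else (s, o)) = (s, o) := by
        simp [havn]
      rw [hstep, ih s o (List.Nodup.of_cons hnd) (fun l hl => hs l (List.mem_cons_of_mem _ hl))]
      simp [havn]

lemma pvLoop2 (xs : List String) : ∀ (s : PySem.Set String) (o : List String),
    (xs.foldl
      (fun (st : PySem.Set String × List String) lead =>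
        if !(PySem.Set.contains st.1 lead) then
          (PySem.Set.add st.1 lead, st.2 ++ [lead])
        else st) (s, o)).2
      = o ++ (PySem.List.dedup xs).filter (fun l => !(s.contains l)) := by
  induction xs with
  | nil => intro s o; simp [PySem.List.dedup, PySem.Set.ofList]
  | cons x xs ih =>
    intro s o
    rw [List.foldl_cons, dedup_cons, List.filter_cons]
    by_cases hmem : x ∈ s
    · have hc : PySem.Set.contains s x = true := by simpa [PySem.Set.contains] using hmem
      simp only [hc, Bool.not_true, if_neg (by simp : ¬(false = true))]
      rw [ih s o, List.filter_filter]
      congr 1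
      apply List.filter_congr
      intro y _
      by_cases hy : y = x
      · subst hy; simp [PySem.Set.contains, hmem]
      · simp [hy]
    · have hc : PySem.Set.contains s x = false := by simp [PySem.Set.contains, hmem]
      have hadd : PySem.Set.add s x = s ++ [x] := by
        simp [PySem.Set.add, PySem.Set.contains]; exact hmem
      simp only [hc, Bool.not_false, if_pos trivial, hadd]
      rw [ih]
      rw [List.filter_filter, List.append_assoc]
      congr 1
      rw [List.singleton_append]
      congr 1
      apply List.filter_congr
      intro y hy'
      by_cases hy : y = x
      · subst hy; simp [PySem.Set.contains]
      · simp [PySem.Set.contains, hy]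

lemma pvBuckets (xs : List String) : ∀ (bs : List (List String)), bs.length = 13 →
    (xs.foldl
      (fun bs lead =>
        PySem.List.pySetD bs ((pvRankN lead : Int))
          (PySem.List.pyGetD bs ((pvRankN lead : Int)) [] ++ [lead])) bs).length = 13 ∧
    ∀ i : Nat, i < 13 →
    (xs.foldl
      (fun bs lead =>
        PySem.List.pySetD bs ((pvRankN lead : Int))
          (PySem.List.pyGetD bs ((pvRankN lead : Int)) [] ++ [lead])) bs).getD i []
      = bs.getD i [] ++ xs.filter (fun l => pvRankN l == i) := by
  induction xs with
  | nil => intro bs h; exact ⟨h, by intro i _; simp⟩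
  | cons x xs ih =>
    intro bs h
    rw [List.foldl_cons]
    have hset : PySem.List.pySetD bs ((pvRankN x : Int))
        (PySem.List.pyGetD bs ((pvRankN x : Int)) [] ++ [x])
        = bs.set (pvRankN x) (bs.getD (pvRankN x) [] ++ [x]) := by
      simp [PySem.List.pySetD_natCast, PySem.List.pyGetD_natCast]
    rw [hset]
    obtain ⟨hlen, hbs⟩ := ih (bs.set (pvRankN x) (bs.getD (pvRankN x) [] ++ [x])) (by simp [h])
    refine ⟨hlen, ?_⟩
    intro i hi
    rw [hbs i hi, List.filter_cons]
    by_cases hix : pvRankN x = i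
    · subst hix
      have : (bs.set (pvRankN x) (bs.getD (pvRankN x) [] ++ [x])).getD (pvRankN x) []
          = bs.getD (pvRankN x) [] ++ [x] := by
        have hr : pvRankN x < 13 := pvRankN_lt x
        simp [List.getD_eq_getElem?_getD, h, hr]
      rw [this]
      simp [List.append_assoc]
    · have : (bs.set (pvRankN x) (bs.getD (pvRankN x) [] ++ [x])).getD i []
          = bs.getD i [] := by
        simp [List.getD_eq_getElem?_getD, hix]
      rw [this]
      have : (pvRankN x == i) = false := by simp [hix]
      simp [this]

lemma pvFilterRank (xs : List String) (hnd : xs.Nodup) (c : String) (i : Nat)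
    (hci : pvRankN c = i) (hi : i < 12) :
    xs.filter (fun l => pvRankN l == i) = if c ∈ xs then [c] else [] := by
  have : xs.filter (fun l => pvRankN l == i) = xs.filter (fun l => l == c) := by
    apply List.filter_congr
    intro y _
    by_cases hy : y = c
    · subst hy; simp [hci]
    · have hne : pvRankN y ≠ i := by
        intro hh
        apply hy
        rw [pvRankN_inj y i hh hi, ← pvRankN_inj c i hci hi]
      simp [hne, hy]
  rw [this, List.filter_beq]
  by_cases hm : c ∈ xs
  · simp [hm, List.count_eq_one_of_mem hnd hm]
  · simp [hm, List.count_eq_zero_of_not_mem hm]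

lemma pvFilterExtra (xs : List String) :
    xs.filter (fun l => pvRankN l == 12) = xs.filter (fun l => !(pvCanon.contains l)) := by
  apply List.filter_congr
  intro y _
  by_cases h : pvRankN y = 12
  · simp [h, pvRankN_extra y h]
  · have hlt : pvRankN y < 12 := by have := pvRankN_lt y; omega
    have : y ∈ pvCanon := by
      have hy := pvRankN_inj y (pvRankN y) rfl hlt
      rw [hy]
      have : pvRankN y < pvCanon.length := by simp [pvCanon]; omega
      simp [List.getD_eq_getElem?_getD, List.getElem?_eq_getElem this]
    simp [h, this]

lemma pvConcat13 (bs : List (List String)) (h : bs.length = 13) (g : Nat → List String)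
    (hg : ∀ i, i < 13 → bs.getD i [] = g i) :
    bs.foldl (fun out b => out ++ b) []
      = g 0 ++ (g 1 ++ (g 2 ++ (g 3 ++ (g 4 ++ (g 5 ++ (g 6 ++ (g 7 ++ (g 8 ++ (g 9 ++ (g 10 ++ (g 11 ++ g 12))))))))))) := by
  rcases bs with _|⟨b0,bs⟩; · simp at h
  rcases bs with _|⟨b1,bs⟩; · simp at h
  rcases bs with _|⟨b2,bs⟩; · simp at h
  rcases bs with _|⟨b3,bs⟩; · simp at h
  rcases bs with _|⟨b4,bs⟩; · simp at h
  rcases bs with _|⟨b5,bs⟩; · simp at h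
  rcases bs with _|⟨b6,bs⟩; · simp at h
  rcases bs with _|⟨b7,bs⟩; · simp at h
  rcases bs with _|⟨b8,bs⟩; · simp at h
  rcases bs with _|⟨b9,bs⟩; · simp at h
  rcases bs with _|⟨b10,bs⟩; · simp at h
  rcases bs with _|⟨b11,bs⟩; · simp at h
  rcases bs with _|⟨b12,bs⟩; · simp at h
  rcases bs with _|⟨b13,bs⟩
  · rw [← hg 0 (by omega), ← hg 1 (by omega), ← hg 2 (by omega), ← hg 3 (by omega),
      ← hg 4 (by omega), ← hg 5 (by omega), ← hg 6 (by omega), ← hg 7 (by omega),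
      ← hg 8 (by omega), ← hg 9 (by omega), ← hg 10 (by omega), ← hg 11 (by omega),
      ← hg 12 (by omega)]
    simp [List.foldl, List.getD, List.append_assoc]
  · simp at h

lemma pvFilterAppendFoldr : ∀ (cs : List String) (p : String → Bool) (E : List String),
    cs.filter p ++ E = cs.foldr (fun c acc => (if p c then [c] else []) ++ acc) E := by
  intro cs
  induction cs with
  | nil => intro p E; simp
  | cons c cs ih =>
    intro p E
    rw [List.foldr_cons, ← ih, List.filter_cons]
    by_cases h : p c = true <;> simp [h]

-- ===== VERDICT (by name: the statement is the Claim_ definition above) =====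
theorem ordered_leads_py_spec : Claim_equal_ordered_leads_py := by
  intro avail _
  unfold Spec_ordered_leads_py
  -- A side
  have hA : ordered_leads_py avail
      = (pvCanon.filter (fun l => avail.contains l))
        ++ (PySem.List.dedup avail).filter (fun l => !(pvCanon.contains l)) := by
    simp only [ordered_leads_py]
    rw [show (["I", "II", "III", "aVR", "aVL", "aVF", "V1", "V2", "V3", "V4", "V5", "V6"] : List String) = pvCanon from rfl]
    rw [pvLoop1 avail pvCanon PySem.Set.empty [] (by decide) (fun l _ => rfl)]
    simp only [PySem.Set.empty, List.nil_append]
    rw [pvLoop2 avail (pvCanon.filter (fun l => avail.contains l)) (pvCanon.filter (fun l => avail.contains l))]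
    congr 1
    apply List.filter_congr
    intro y hy
    have hyav : y ∈ avail := (PySem.List.mem_dedup avail y).mp hy
    simp [PySem.Set.contains, List.mem_filter, hyav]
  -- B side
  have hB : ordered_leads_py_alt avail
      = ((PySem.List.dedup avail).filter (fun l => pvRankN l == 0))
        ++ (((PySem.List.dedup avail).filter (fun l => pvRankN l == 1))
        ++ (((PySem.List.dedup avail).filter (fun l => pvRankN l == 2))
        ++ (((PySem.List.dedup avail).filter (fun l => pvRankN l == 3))
        ++ (((PySem.List.dedup avail).filter (fun l => pvRankN l == 4))
        ++ (((PySem.List.dedup avail).filter (fun l => pvRankN l == 5))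
        ++ (((PySem.List.dedup avail).filter (fun l => pvRankN l == 6))
        ++ (((PySem.List.dedup avail).filter (fun l => pvRankN l == 7))
        ++ (((PySem.List.dedup avail).filter (fun l => pvRankN l == 8))
        ++ (((PySem.List.dedup avail).filter (fun l => pvRankN l == 9))
        ++ (((PySem.List.dedup avail).filter (fun l => pvRankN l == 10))
        ++ (((PySem.List.dedup avail).filter (fun l => pvRankN l == 11))
        ++ ((PySem.List.dedup avail).filter (fun l => pvRankN l == 12))))))))))))) := by
    simp only [ordered_leads_py_alt]
    rw [show (["I", "II", "III", "aVR", "aVL", "aVF", "V1", "V2", "V3", "V4", "V5", "V6"] : List String) = pvCanon from rfl]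
    simp only [pvRank_eq]
    obtain ⟨hlen, hget⟩ := pvBuckets (PySem.List.dedup avail) (List.replicate 13 []) (by simp)
    exact pvConcat13 _ hlen (fun i => (PySem.List.dedup avail).filter (fun l => pvRankN l == i))
      (by intro i hi; rw [hget i hi]; interval_cases i <;> rfl)
  rw [hA, hB]
  have hnd := PySem.List.nodup_dedup avail
  rw [pvFilterRank _ hnd "I" 0 (by decide) (by omega),
    pvFilterRank _ hnd "II" 1 (by decide) (by omega),
    pvFilterRank _ hnd "III" 2 (by decide) (by omega),
    pvFilterRank _ hnd "aVR" 3 (by decide) (by omega),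
    pvFilterRank _ hnd "aVL" 4 (by decide) (by omega),
    pvFilterRank _ hnd "aVF" 5 (by decide) (by omega),
    pvFilterRank _ hnd "V1" 6 (by decide) (by omega),
    pvFilterRank _ hnd "V2" 7 (by decide) (by omega),
    pvFilterRank _ hnd "V3" 8 (by decide) (by omega),
    pvFilterRank _ hnd "V4" 9 (by decide) (by omega),
    pvFilterRank _ hnd "V5" 10 (by decide) (by omega),
    pvFilterRank _ hnd "V6" 11 (by decide) (by omega),
    pvFilterExtra]
  rw [pvFilterAppendFoldr]
  simp [pvCanon]
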